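-- pv_equiv track=rewrite | github.com/fdurupinar/sOED | FlowCytometry/staticMethods.py | generate_cross_over_indices
-- ===== SOURCE A (Python) =====
-- def generate_cross_over_indices(ind_len):
--     """
--     Generate an array of arrays for indices to cross-over
--     :param ind_len:
--     :return:
--     """
--     inds_group = []
--     for i in range(0, ind_len):
--         for j in range(i + 1, ind_len):
--             for k in range(0, ind_len):
--                 for l in range(k + 1, ind_len):
--                     inds = [[i, j], [k, l]]
--                     inds_group.append(inds)
--
--     return inds_group
-- ===== SOURCE B (Python) =====
-- def generate_cross_over_indices(ind_len):
--     """Arithmetic unranking: the t-th output group is decoded directly from t by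
--     divmod into two pair ranks, each unranked into its [i, j] pair."""
--     n = ind_len
--     num_pairs = n * (n - 1) // 2 if n > 0 else 0
--
--     def unrank(r):
--         # decode rank r (0 <= r < num_pairs) into the r-th pair [i, j] in lex order
--         for i in range(n):
--             size = n - 1 - i
--             if r < size:
--                 return [i, i + 1 + r]
--             r -= size
--         return [0, 0]  # unreachable for valid ranks
--
--     return [[unrank(t // num_pairs), unrank(t % num_pairs)]
--             for t in range(num_pairs * num_pairs)]
-- ===== Notes on version B (the rewrite author's own statement) =====
-- stated objective: alternative
-- what changed: Replaces the four nested enumeration loops by arithmetic unranking: one flat loop over the output positions t, decoding each t by divmod into two pair ranks and unranking each rank into its [i, j] pair.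
import Mathlib
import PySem

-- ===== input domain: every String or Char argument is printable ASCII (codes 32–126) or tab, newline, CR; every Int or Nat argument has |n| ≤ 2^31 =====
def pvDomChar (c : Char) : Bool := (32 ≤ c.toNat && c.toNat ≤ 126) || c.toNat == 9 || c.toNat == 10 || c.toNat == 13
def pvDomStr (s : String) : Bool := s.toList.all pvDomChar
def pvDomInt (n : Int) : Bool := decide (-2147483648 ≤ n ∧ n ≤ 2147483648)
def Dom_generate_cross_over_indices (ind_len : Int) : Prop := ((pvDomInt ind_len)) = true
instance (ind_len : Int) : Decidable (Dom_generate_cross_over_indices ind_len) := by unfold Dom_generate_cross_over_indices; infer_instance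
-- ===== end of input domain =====

-- B replaces the four nested loops by arithmetic unranking of each output position (alternative algorithm, same output).

-- ===== PORT A =====
-- four nested loops, each appending one [[i,j],[k,l]] group
def generate_cross_over_indices (ind_len : Int) : List (List (List Int)) :=
  (PySem.List.pyRange 0 ind_len 1).foldl (fun acc i =>
    (PySem.List.pyRange (i + 1) ind_len 1).foldl (fun acc j =>
      (PySem.List.pyRange 0 ind_len 1).foldl (fun acc k =>
        (PySem.List.pyRange (k + 1) ind_len 1).foldl (fun acc l =>
          acc ++ [[[i, j], [k, l]]]) acc) acc) acc) []

-- ===== PORT B =====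
-- Source B's `unrank` helper: the `for i in range(n)` loop with early return, carrying r
def pvUnrankGo (n : Int) : List Int → Int → List Int
  | [], _ => [0, 0]
  | i :: rest, r =>
    if r < n - 1 - i then [i, i + 1 + r] else pvUnrankGo n rest (r - (n - 1 - i))

def generate_cross_over_indices_alt (ind_len : Int) : List (List (List Int)) :=
  let n := ind_len
  let numPairs : Int := if n > 0 then PySem.Int.floordiv (n * (n - 1)) 2 else 0
  (PySem.List.pyRange 0 (numPairs * numPairs) 1).map
    (fun t => [pvUnrankGo n (PySem.List.pyRange 0 n 1) (PySem.Int.floordiv t numPairs),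
               pvUnrankGo n (PySem.List.pyRange 0 n 1) (PySem.Int.mod t numPairs)])

-- ===== PRECONDITION & SPEC =====
def Spec_generate_cross_over_indices (ind_len : Int) (out : List (List (List Int))) : Prop := out = generate_cross_over_indices_alt ind_len
instance (ind_len : Int) (out : List (List (List Int))) : Decidable (Spec_generate_cross_over_indices ind_len out) := by unfold Spec_generate_cross_over_indices; infer_instance

-- ===== CLAIM (what is proved, stated in full; the proofs are below) =====
def Claim_equal_generate_cross_over_indices : Prop := ∀ (ind_len : Int), Dom_generate_cross_over_indices ind_len → Spec_generate_cross_over_indices ind_len (generate_cross_over_indices ind_len)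

-- ===== LEMMAS AND PROOFS =====

-- the lexicographic pair list, as A enumerates it
def pvPairs (n : Int) : List (List Int) :=
  (PySem.List.pyRange 0 n 1).flatMap (fun i =>
    (PySem.List.pyRange (i + 1) n 1).map (fun j => [i, j]))

-- the same pair list over Nats, suffix starting at a with m indices remaining
def pvLs (a m : Nat) : List (List Int) :=
  (List.range m).flatMap (fun s =>
    (List.range (m - (s + 1))).map (fun (d : Nat) => [((a + s : Nat) : Int), ((a + s : Nat) : Int) + 1 + (d : Int)]))

-- A's nested appending loops collapse to nested flatMaps
theorem genA_eq_flatMap (n : Int) :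
    generate_cross_over_indices n =
      (PySem.List.pyRange 0 n 1).flatMap (fun i =>
        (PySem.List.pyRange (i + 1) n 1).flatMap (fun j =>
          (PySem.List.pyRange 0 n 1).flatMap (fun k =>
            (PySem.List.pyRange (k + 1) n 1).map (fun l => [[i, j], [k, l]])))) := by
  unfold generate_cross_over_indices
  have hk : ∀ (i j : Int) (acc : List (List (List Int))) (k : Int),
      (PySem.List.pyRange (k+1) n 1).foldl (fun acc l => acc ++ [[[i, j], [k, l]]]) acc =
      acc ++ (PySem.List.pyRange (k+1) n 1).map (fun l => [[i, j], [k, l]]) := by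
    intro i j acc k; exact PySem.List.foldl_append_singleton_eq_map _ _ _
  have hj : ∀ (i : Int) (acc : List (List (List Int))) (j : Int),
      (PySem.List.pyRange 0 n 1).foldl (fun acc k =>
        (PySem.List.pyRange (k+1) n 1).foldl (fun acc l => acc ++ [[[i, j], [k, l]]]) acc) acc =
      acc ++ (PySem.List.pyRange 0 n 1).flatMap (fun k =>
        (PySem.List.pyRange (k+1) n 1).map (fun l => [[i, j], [k, l]])) := by
    intro i acc j
    calc _ = (PySem.List.pyRange 0 n 1).foldl (fun acc k =>
              acc ++ (PySem.List.pyRange (k+1) n 1).map (fun l => [[i, j], [k, l]])) acc := by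
            apply PySem.List.foldl_congr_mem; intro acc k _; exact hk i j acc k
      _ = _ := PySem.List.foldl_append_eq_flatMap _ _ _
  have hi : ∀ (acc : List (List (List Int))) (i : Int),
      (PySem.List.pyRange (i+1) n 1).foldl (fun acc j =>
        (PySem.List.pyRange 0 n 1).foldl (fun acc k =>
          (PySem.List.pyRange (k+1) n 1).foldl (fun acc l => acc ++ [[[i, j], [k, l]]]) acc) acc) acc =
      acc ++ (PySem.List.pyRange (i+1) n 1).flatMap (fun j =>
        (PySem.List.pyRange 0 n 1).flatMap (fun k =>
          (PySem.List.pyRange (k+1) n 1).map (fun l => [[i, j], [k, l]]))) := by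
    intro acc i
    calc _ = (PySem.List.pyRange (i+1) n 1).foldl (fun acc j =>
              acc ++ (PySem.List.pyRange 0 n 1).flatMap (fun k =>
                (PySem.List.pyRange (k+1) n 1).map (fun l => [[i, j], [k, l]]))) acc := by
            apply PySem.List.foldl_congr_mem; intro acc j _; exact hj i acc j
      _ = _ := PySem.List.foldl_append_eq_flatMap _ _ _
  calc _ = (PySem.List.pyRange 0 n 1).foldl (fun acc i =>
            acc ++ (PySem.List.pyRange (i+1) n 1).flatMap (fun j =>
              (PySem.List.pyRange 0 n 1).flatMap (fun k =>
                (PySem.List.pyRange (k+1) n 1).map (fun l => [[i, j], [k, l]])))) [] := by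
          apply PySem.List.foldl_congr_mem; intro acc i _; exact hi acc i
    _ = _ := by rw [PySem.List.foldl_append_eq_flatMap]; simp

-- A is the cartesian square of its pair list
theorem genA_eq_pairs_prod (n : Int) :
    generate_cross_over_indices n =
      (pvPairs n).flatMap (fun p => (pvPairs n).map (fun q => [p, q])) := by
  rw [genA_eq_flatMap]
  simp [pvPairs, List.map_flatMap, List.flatMap_map, List.flatMap_assoc, Function.comp_def]

-- the Int pair list is the Nat pair list
theorem pvPairs_eq_pvLs (N : Nat) : pvPairs (N : Int) = pvLs 0 N := by
  unfold pvPairs pvLs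
  rw [PySem.List.pyRange_one]
  simp only [List.flatMap_map, Int.sub_zero, Int.toNat_natCast, zero_add]
  apply List.flatMap_congr
  intro a ha
  have ha' : a < N := List.mem_range.mp ha
  rw [PySem.List.pyRange_one]
  have h1 : ((N : Int) - ((a : Int) + 1)).toNat = N - (a + 1) := by omega
  rw [h1]
  simp [List.map_map, Function.comp_def]

-- triangular recurrence
theorem tri_succ (m : Nat) : (m + 1) * m / 2 = m + m * (m - 1) / 2 := by
  cases m with
  | zero => rfl
  | succ k =>
    have h : (k + 2) * (k + 1) = (k + 1) * k + (k + 1) * 2 := by ring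
    simp [h, Nat.add_mul_div_right]
    omega

-- peeling the first index off the Nat pair list
theorem pvLs_succ (a m : Nat) :
    pvLs a (m + 1) =
      (List.range m).map (fun (d : Nat) => [(a : Int), (a : Int) + 1 + (d : Int)]) ++ pvLs (a + 1) m := by
  unfold pvLs
  rw [List.range_succ_eq_map]
  simp only [List.flatMap_cons, List.flatMap_map]
  congr 1
  apply List.flatMap_congr
  intro s hs
  have h1 : m + 1 - (s.succ + 1) = m - (s + 1) := by omega
  have h2 : a + s.succ = a + 1 + s := by omega
  rw [h1, h2]

-- unranking enumerates the pair list in order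
theorem unrank_enum (m a : Nat) :
    (List.range (m * (m - 1) / 2)).map
        (fun r => pvUnrankGo ((a : Int) + (m : Int)) (PySem.List.pyRange (a : Int) ((a : Int) + (m : Int)) 1) ((r : Nat) : Int)) =
      pvLs a m := by
  induction m generalizing a with
  | zero => simp [pvLs]
  | succ m ih =>
    simp only [Nat.add_sub_cancel]
    rw [tri_succ m]
    rw [List.range_add, List.map_append]
    have hcons : PySem.List.pyRange (a : Int) ((a : Int) + ((m : Nat) + 1 : Nat)) 1 =
        (a : Int) :: PySem.List.pyRange ((a : Int) + 1) ((a : Int) + ((m : Nat) + 1 : Nat)) 1 :=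
      PySem.List.pyRange_one_cons (by push_cast; omega)
    rw [pvLs_succ]
    congr 1
    · apply List.map_congr_left
      intro r hr
      have hr' : r < m := List.mem_range.mp hr
      rw [hcons]
      simp only [pvUnrankGo]
      rw [if_pos (by push_cast; omega)]
    · rw [List.map_map]
      have key : ∀ r : Nat,
          pvUnrankGo ((a : Int) + ((m : Nat) + 1 : Nat)) (PySem.List.pyRange (a : Int) ((a : Int) + ((m : Nat) + 1 : Nat)) 1) ((m + r : Nat) : Int) =
          pvUnrankGo (((a + 1 : Nat) : Int) + (m : Int)) (PySem.List.pyRange ((a + 1 : Nat) : Int) (((a + 1 : Nat) : Int) + (m : Int)) 1) ((r : Nat) : Int) := by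
        intro r
        rw [hcons]
        simp only [pvUnrankGo]
        rw [if_neg (by push_cast; omega)]
        have e1 : ((m + r : Nat) : Int) - ((a : Int) + ((m : Nat) + 1 : Nat) - 1 - (a : Int)) = ((r : Nat) : Int) := by push_cast; ring
        have e2 : ((a : Int) + ((m : Nat) + 1 : Nat)) = (((a + 1 : Nat) : Int) + (m : Int)) := by push_cast; ring
        have e3 : ((a : Int) + 1) = ((a + 1 : Nat) : Int) := by push_cast; ring
        rw [e1, e2, e3]
      calc (List.range (m * (m - 1) / 2)).map (fun r => pvUnrankGo ((a : Int) + ((m : Nat) + 1 : Nat)) (PySem.List.pyRange (a : Int) ((a : Int) + ((m : Nat) + 1 : Nat)) 1) ((m + r : Nat) : Int))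
          = (List.range (m * (m - 1) / 2)).map (fun r => pvUnrankGo (((a + 1 : Nat) : Int) + (m : Int)) (PySem.List.pyRange ((a + 1 : Nat) : Int) (((a + 1 : Nat) : Int) + (m : Int)) 1) ((r : Nat) : Int)) := by
            apply List.map_congr_left; intro r _; exact key r
        _ = pvLs (a + 1) m := ih (a + 1)

-- divmod decoding of a flat range is a cartesian square
theorem range_mul_decode {α : Type} (m k : Nat) (g : Nat → Nat → α) :
    (List.range (m * k)).map (fun t => g (t / k) (t % k)) =
      (List.range m).flatMap (fun a => (List.range k).map (fun b => g a b)) := by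
  induction m with
  | zero => simp
  | succ m ih =>
    rcases Nat.eq_zero_or_pos k with hk | hk
    · simp [hk]
    · have h1 : (m + 1) * k = m * k + k := by ring
      rw [h1, List.range_add, List.map_append, ih, List.range_succ, List.flatMap_append]
      congr 1
      simp only [List.map_map, List.flatMap_cons, List.flatMap_nil, List.append_nil]
      apply List.map_congr_left
      intro b hb
      have hb' : b < k := List.mem_range.mp hb
      have hd : (m * k + b) / k = m := by
        rw [Nat.mul_comm m k, Nat.mul_add_div hk, Nat.div_eq_of_lt hb']
        omega
      have hm : (m * k + b) % k = b := by
        simp [Nat.mul_comm m k, Nat.mod_eq_of_lt hb']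
      simp [hd, hm]

-- a product over ranks is the product over the enumerated list
theorem rank_prod_transfer {α β : Type} (P : Nat) (f : Nat → β) (L : List β)
    (h : (List.range P).map f = L) (g : β → β → α) :
    (List.range P).flatMap (fun a => (List.range P).map (fun b => g (f a) (f b))) =
      L.flatMap (fun p => L.map (fun q => g p q)) := by
  rw [← h]
  simp [List.flatMap_map, List.map_map, Function.comp_def]

-- ===== VERDICT (by name: the statement is the Claim_ definition above) =====
theorem generate_cross_over_indices_spec : Claim_equal_generate_cross_over_indices := by
  intro n _
  unfold Spec_generate_cross_over_indices
  simp only [generate_cross_over_indices_alt]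
  by_cases hn : 0 < n
  · obtain ⟨N, rfl⟩ : ∃ N : Nat, n = (N : Int) := ⟨n.toNat, by omega⟩
    have hN : 1 ≤ N := by exact_mod_cast hn
    set P : Nat := N * (N - 1) / 2 with hP
    have hnum : (if (N : Int) > 0 then PySem.Int.floordiv ((N : Int) * ((N : Int) - 1)) 2 else 0) = (P : Int) := by
      rw [if_pos hn]
      have h1 : (N : Int) * ((N : Int) - 1) = ((N * (N - 1) : Nat) : Int) := by
        have : ((N : Int) - 1) = ((N - 1 : Nat) : Int) := by omega
        rw [this]; push_cast; ring
      rw [h1]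
      exact_mod_cast PySem.Int.floordiv_natCast (N * (N - 1)) 2
    rw [hnum]
    have hPP : (P : Int) * (P : Int) = ((P * P : Nat) : Int) := by push_cast; ring
    rw [hPP, PySem.List.pyRange_one 0 ((P * P : Nat) : Int)]
    simp only [Int.sub_zero, Int.toNat_natCast, List.map_map, Function.comp_def, zero_add]
    have hstep : ∀ t : Nat,
        [pvUnrankGo (N : Int) (PySem.List.pyRange 0 (N : Int) 1) (PySem.Int.floordiv (t : Int) (P : Int)),
         pvUnrankGo (N : Int) (PySem.List.pyRange 0 (N : Int) 1) (PySem.Int.mod (t : Int) (P : Int))] =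
        [pvUnrankGo (N : Int) (PySem.List.pyRange 0 (N : Int) 1) ((t / P : Nat) : Int),
         pvUnrankGo (N : Int) (PySem.List.pyRange 0 (N : Int) 1) ((t % P : Nat) : Int)] := by
      intro t
      rw [PySem.Int.floordiv_natCast, PySem.Int.mod_natCast]
    rw [List.map_congr_left (fun t _ => hstep t)]
    rw [range_mul_decode P P
        (fun x y => [pvUnrankGo (N : Int) (PySem.List.pyRange 0 (N : Int) 1) ((x : Nat) : Int),
                     pvUnrankGo (N : Int) (PySem.List.pyRange 0 (N : Int) 1) ((y : Nat) : Int)])]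
    have hU : (List.range P).map (fun r => pvUnrankGo (N : Int) (PySem.List.pyRange 0 (N : Int) 1) ((r : Nat) : Int)) = pvLs 0 N := by
      have := unrank_enum N 0
      simpa using this
    rw [rank_prod_transfer P _ (pvLs 0 N) hU (fun p q => [p, q])]
    rw [genA_eq_pairs_prod, pvPairs_eq_pvLs]
  · have hnil : PySem.List.pyRange 0 n 1 = [] := PySem.List.pyRange_one_eq_nil (by omega)
    rw [if_neg hn]
    rw [genA_eq_pairs_prod]
    simp [pvPairs, hnil]
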